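-- pv_equiv track=rewrite | github.com/mohhh-ok/chord-player-mcp | chord_player_mcp.py | chord_to_midi_notes
-- ===== SOURCE A (Python) =====
-- def chord_to_midi_notes(root, intervals, bass_override, base_octave=4, voicing="close"):
--     base_midi = 12 * (base_octave + 1) + root
--     notes = [base_midi + iv for iv in intervals]
--
--     if voicing == "open" and len(notes) >= 3:
--         notes[1] += 12
--     elif voicing == "drop2" and len(notes) >= 3:
--         notes[-2] -= 12
--         notes.sort()
--
--     if bass_override is not None:
--         bass_midi = 12 * base_octave + bass_override
--         while bass_midi >= min(notes):
--             bass_midi -= 12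
--         notes.insert(0, bass_midi)
--     elif voicing != "close":
--         notes.insert(0, base_midi - 12)
--
--     return notes
-- ===== SOURCE B (Python) =====
-- def _voiced_intervals(intervals, voicing):
--     ivs = list(intervals)
--     if len(ivs) < 3:
--         return ivs
--     if voicing == "open":
--         return ivs[:1] + [ivs[1] + 12] + ivs[2:]
--     if voicing == "drop2":
--         ivs[-2] -= 12
--         ivs.sort()
--     return ivs
--
--
-- def chord_to_midi_notes(root, intervals, bass_override, base_octave=4, voicing="close"):
--     # voicing is applied to the intervals BEFORE the octave offset is added:
--     # sorting and taking min commute with adding the constant base_midi.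
--     ivs = _voiced_intervals(intervals, voicing)
--     base_midi = 12 * (base_octave + 1) + root
--     if bass_override is not None:
--         bass = 12 * base_octave + bass_override
--         m = base_midi + min(ivs)
--         head = [bass - 12 * max(0, (bass - m) // 12 + 1)]
--     elif voicing != "close":
--         head = [base_midi - 12]
--     else:
--         head = []
--     return head + [base_midi + iv for iv in ivs]
-- ===== Notes on version B (the rewrite author's own statement) =====
-- stated objective: simpler
-- what changed: B applies the voicing rearrangement to the raw intervals before the octave offset is added (sort and min commute with adding the constant base_midi), replaces the iterative octave-dropping while-loop by one closed-form floor-division formula bass - 12*max(0,(bass-m)//12+1), and assembles the result as head + comprehension instead of mutating the list with insert(0,...).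
import Mathlib
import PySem

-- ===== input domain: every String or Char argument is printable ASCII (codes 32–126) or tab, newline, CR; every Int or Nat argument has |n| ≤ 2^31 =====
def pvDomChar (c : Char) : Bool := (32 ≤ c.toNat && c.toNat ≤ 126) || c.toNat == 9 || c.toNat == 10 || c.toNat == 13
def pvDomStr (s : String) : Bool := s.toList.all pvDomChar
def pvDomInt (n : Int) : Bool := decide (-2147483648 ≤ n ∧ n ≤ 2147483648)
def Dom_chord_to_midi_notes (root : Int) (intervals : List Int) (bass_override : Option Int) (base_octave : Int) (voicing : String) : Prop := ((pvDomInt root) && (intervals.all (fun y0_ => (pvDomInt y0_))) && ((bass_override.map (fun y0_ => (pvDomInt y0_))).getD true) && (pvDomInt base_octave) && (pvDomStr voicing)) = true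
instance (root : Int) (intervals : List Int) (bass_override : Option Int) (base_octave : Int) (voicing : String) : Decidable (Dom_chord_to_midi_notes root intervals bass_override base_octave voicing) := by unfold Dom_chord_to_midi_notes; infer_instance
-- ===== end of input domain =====

-- B applies the voicing to the intervals before the octave offset is added and replaces A's
-- octave-dropping while-loop by one closed-form floor-division formula (simpler; same cost).


-- ===== PORT A =====
-- the 'while bass_midi >= min(notes): bass_midi -= 12' loop (min(notes) re-evaluated each test, as in the source)
def pvAWhile (notes : List Int) (bass : Int) : Int :=
  match h : PySem.List.min? notes (fun x => x) with
  | none => bass                 -- Python raises ValueError here (notes = []); excluded by Pre_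
  | some m => if bass ≥ m then pvAWhile notes (bass - 12) else bass
termination_by (bass - (PySem.List.min? notes (fun x => x)).getD 0 + 12).toNat
decreasing_by simp_all; omega

def chord_to_midi_notes (root : Int) (intervals : List Int) (bass_override : Option Int) (base_octave : Int) (voicing : String) : List Int :=
  let base_midi := 12 * (base_octave + 1) + root
  let notes0 := intervals.map (fun iv => base_midi + iv)
  let notes :=
    if voicing == "open" && decide (notes0.length ≥ 3) then
      match notes0 with                                   -- notes[1] += 12
      | a :: b :: rest => a :: (b + 12) :: rest
      | l => l
    else if voicing == "drop2" && decide (notes0.length ≥ 3) then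
      -- notes[-2] -= 12; notes.sort()
      PySem.List.sorted (notes0.set (notes0.length - 2) (notes0.getD (notes0.length - 2) 0 - 12)) (fun x => x) false
    else notes0
  match bass_override with
  | some b => pvAWhile notes (12 * base_octave + b) :: notes
  | none => if voicing != "close" then (base_midi - 12) :: notes else notes

-- ===== PORT B =====
-- _voiced_intervals: the voicing rearrangement applied to the raw intervals (no octave offset yet)
def pvVoiced (intervals : List Int) (voicing : String) : List Int :=
  if decide (intervals.length < 3) then intervals
  else if voicing == "open" then
    PySem.List.slice intervals none (some 1)
      ++ [PySem.List.pyGetD intervals 1 0 + 12]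
      ++ PySem.List.slice intervals (some 2) none       -- ivs[:1] + [ivs[1]+12] + ivs[2:]
  else if voicing == "drop2" then
    PySem.List.sorted (intervals.set (intervals.length - 2) (intervals.getD (intervals.length - 2) 0 - 12)) (fun x => x) false
  else intervals

def chord_to_midi_notes_alt (root : Int) (intervals : List Int) (bass_override : Option Int) (base_octave : Int) (voicing : String) : List Int :=
  let ivs := pvVoiced intervals voicing
  let base_midi := 12 * (base_octave + 1) + root
  let head : List Int :=
    match bass_override with
    | some b =>
      let bass := 12 * base_octave + b
      let m := base_midi + (PySem.List.min? ivs (fun x => x)).getD 0   -- min(ivs); Python raises on [] (outside Pre_)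
      [bass - 12 * max 0 (PySem.Int.floordiv (bass - m) 12 + 1)]
    | none => if voicing != "close" then [base_midi - 12] else []
  head ++ ivs.map (fun iv => base_midi + iv)

-- ===== PRECONDITION & SPEC =====
-- Pre_ excludes only intervals = [] together with a bass override, where both A and B raise ValueError on min([]).
def Pre_chord_to_midi_notes (root : Int) (intervals : List Int) (bass_override : Option Int) (base_octave : Int) (voicing : String) : Prop :=
  bass_override = none ∨ intervals ≠ []
instance (root : Int) (intervals : List Int) (bass_override : Option Int) (base_octave : Int) (voicing : String) : Decidable (Pre_chord_to_midi_notes root intervals bass_override base_octave voicing) := by unfold Pre_chord_to_midi_notes; infer_instance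

def pvWitness_chord_to_midi_notes : Int × List Int × Option Int × Int × String := (0, [0, 4, 7], some 5, 4, "open")

def Spec_chord_to_midi_notes (root : Int) (intervals : List Int) (bass_override : Option Int) (base_octave : Int) (voicing : String) (out : List Int) : Prop := out = chord_to_midi_notes_alt root intervals bass_override base_octave voicing
instance (root : Int) (intervals : List Int) (bass_override : Option Int) (base_octave : Int) (voicing : String) (out : List Int) : Decidable (Spec_chord_to_midi_notes root intervals bass_override base_octave voicing out) := by unfold Spec_chord_to_midi_notes; infer_instance

-- ===== CLAIM (what is proved, stated in full; the proofs are below) =====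
def Claim_equal_chord_to_midi_notes : Prop := ∀ (root : Int) (intervals : List Int) (bass_override : Option Int) (base_octave : Int) (voicing : String), Dom_chord_to_midi_notes root intervals bass_override base_octave voicing → Pre_chord_to_midi_notes root intervals bass_override base_octave voicing → Spec_chord_to_midi_notes root intervals bass_override base_octave voicing (chord_to_midi_notes root intervals bass_override base_octave voicing)

-- ===== LEMMAS AND PROOFS =====

-- the while-loop equals B's closed floor-division form
theorem pvAWhile_closed (notes : List Int) (m : Int)
    (h : PySem.List.min? notes (fun x => x) = some m) (bass : Int) :
    pvAWhile notes bass = bass - 12 * max 0 (PySem.Int.floordiv (bass - m) 12 + 1) := by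
  rw [pvAWhile.eq_def]
  split
  next heq => rw [heq] at h; exact absurd h (by simp)
  next m' heq =>
    rw [heq] at h
    injection h with h'
    subst h'
    split_ifs with hb
    · rw [pvAWhile_closed notes m' heq (bass - 12),
        PySem.Int.floordiv_eq_ediv_of_pos (a := bass - 12 - m') (by norm_num),
        PySem.Int.floordiv_eq_ediv_of_pos (a := bass - m') (by norm_num)]
      omega
    · rw [PySem.Int.floordiv_eq_ediv_of_pos (by norm_num)]
      omega
termination_by (bass - m + 12).toNat
decreasing_by simp_all; omega

-- sorting with the identity key commutes with adding a constant
theorem pv_sorted_map_add (l : List Int) (c : Int) :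
    PySem.List.sorted (l.map (fun y => c + y)) (fun x => x) false
      = (PySem.List.sorted l (fun x => x) false).map (fun y => c + y) := by
  apply PySem.List.sorted_id_eq_of_perm_of_pairwise
  · exact (PySem.List.sorted_perm l _ _).map _
  · exact List.Pairwise.map _ (fun a b h => by omega) (PySem.List.sorted_pairwise l _)

-- min with the identity key commutes with adding a constant
theorem pv_min_map_add (x : Int) (t : List Int) (c : Int) :
    (PySem.List.min? ((x :: t).map (fun y => c + y)) (fun y => y)).getD 0
      = c + (PySem.List.min? (x :: t) (fun y => y)).getD 0 := by
  simp only [List.map_cons, PySem.List.min?_id_cons, Option.getD_some]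
  induction t generalizing x with
  | nil => simp
  | cons h t ih => simpa [List.foldl, Int.min_add_left] using ih (min x h)

-- A's voiced note list is B's voiced interval list shifted by base_midi
theorem pv_voiced_map (l : List Int) (v : String) (c : Int) :
    (if v == "open" && decide ((l.map (fun y => c + y)).length ≥ 3) then
      match l.map (fun y => c + y) with
      | a :: b :: rest => a :: (b + 12) :: rest
      | l' => l'
    else if v == "drop2" && decide ((l.map (fun y => c + y)).length ≥ 3) then
      PySem.List.sorted ((l.map (fun y => c + y)).set ((l.map (fun y => c + y)).length - 2)
        ((l.map (fun y => c + y)).getD ((l.map (fun y => c + y)).length - 2) 0 - 12)) (fun x => x) false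
    else l.map (fun y => c + y))
    = (pvVoiced l v).map (fun y => c + y) := by
  by_cases h3 : l.length ≥ 3
  · unfold pvVoiced
    by_cases ho : v == "open"
    · obtain ⟨a, b, d, t, rfl⟩ : ∃ a b d t, l = a :: b :: d :: t := by
        cases l with
        | nil => simp at h3
        | cons a l1 =>
          cases l1 with
          | nil => simp at h3
          | cons b l2 =>
            cases l2 with
            | nil => simp at h3
            | cons d t => exact ⟨a, b, d, t, rfl⟩
      simp [ho, PySem.List.slice, PySem.List.pyGetD]
      rw [if_neg (by omega)]
      simp [PySem.List.pyGet?, PySem.List.pyIdx?]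
      split_ifs with hh
      · simp; ring
      · exfalso; omega
    · by_cases hd : v == "drop2"
      · have hlen : (l.map (fun y => c + y)).length = l.length := by simp
        have hlt : l.length - 2 < l.length := by omega
        have hgd : (l.map (fun y => c + y)).getD (l.length - 2) 0 = c + l.getD (l.length - 2) 0 := by
          rw [List.getD_eq_getElem?_getD, List.getD_eq_getElem?_getD, List.getElem?_map,
            List.getElem?_eq_getElem hlt]
          simp
        simp only [ho, hd, h3, hlen, hgd, decide_true, Bool.false_and, Bool.true_and,
          decide_eq_true_eq, if_true, if_false, Bool.false_eq_true]
        have hset : (l.map (fun y => c + y)).set (l.length - 2) (c + l.getD (l.length - 2) 0 - 12)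
            = (l.set (l.length - 2) (l.getD (l.length - 2) 0 - 12)).map (fun y => c + y) := by
          rw [List.map_set]; ring_nf
        rw [if_neg (by omega), hset, pv_sorted_map_add]
      · simp [ho, hd, h3]
  · unfold pvVoiced
    simp [if_pos (by omega : l.length < 3), h3, List.length_map]
-- (the Bool.false_eq_true/if shuffling above just aligns A's '&&' chain with B's hoisted length test)

theorem pv_voiced_ne_nil (l : List Int) (v : String) (hl : l ≠ []) : pvVoiced l v ≠ [] := by
  unfold pvVoiced
  split_ifs with h1 h2 h3
  · exact hl
  · simp
  · intro hs
    rw [PySem.List.sorted_eq_nil_iff] at hs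
    exact hl (by simpa using hs)
  · exact hl

-- ===== VERDICT =====
theorem chord_to_midi_notes_spec : Claim_equal_chord_to_midi_notes := by
  intro root intervals bass_override base_octave voicing _ hpre
  have hvo := pv_voiced_map intervals voicing (12 * (base_octave + 1) + root)
  cases bass_override with
  | none =>
    simp only [Spec_chord_to_midi_notes, chord_to_midi_notes, chord_to_midi_notes_alt]
    rw [hvo]
    split_ifs <;> simp
  | some b =>
    have hne : intervals ≠ [] := by
      rcases hpre with h | h
      · exact absurd h (by simp)
      · exact h
    obtain ⟨x, t, hxt⟩ := List.exists_cons_of_ne_nil (pv_voiced_ne_nil intervals voicing hne)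
    simp only [Spec_chord_to_midi_notes, chord_to_midi_notes, chord_to_midi_notes_alt]
    rw [hvo, hxt]
    have hmin : PySem.List.min? ((x :: t).map (fun y => 12 * (base_octave + 1) + root + y)) (fun y => y)
        = some (((x :: t).map (fun y => 12 * (base_octave + 1) + root + y)).tail.foldl min
            (12 * (base_octave + 1) + root + x)) := by
      simp [PySem.List.min?_id_cons]
    rw [pvAWhile_closed _ _ hmin]
    have := pv_min_map_add x t (12 * (base_octave + 1) + root)
    simp only [PySem.List.min?_id_cons, Option.getD_some, List.map_cons, List.tail_cons] at this ⊢
    rw [this]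
    rfl
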